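-- pv_equiv track=rewrite | github.com/EL-CL/temperature-sonority | test_vowel_length_solutions.py | double_monophthongs
-- ===== SOURCE A (Python) =====
-- VOWELS = '3iueEoa'
--
-- def double_monophthongs(word):
--     # Nasalization does not affect calculation
--     word = word.replace('*', '')
--     i = 0
--     while i < len(word):
--         if word[i] in VOWELS:
--             if i == len(word) - 1 or word[i + 1] not in VOWELS:
--                 word = word[:i] + word[i] * 2 + word[i + 1:]
--             while i < len(word) - 1 and word[i + 1] in VOWELS:
--                 i += 1
--         i += 1
--     return word
-- ===== SOURCE B (Python) =====
-- VOWELS = '3iueEoa'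
--
-- def double_monophthongs(word):
--     # One pass over vowel runs: double only length-1 runs, join the pieces at the end.
--     word = word.replace('*', '')
--     out = []
--     i, n = 0, len(word)
--     while i < n:
--         c = word[i]
--         if c in VOWELS:
--             j = i + 1
--             while j < n and word[j] in VOWELS:
--                 j += 1
--             out.append(c + c if j - i == 1 else word[i:j])
--             i = j
--         else:
--             out.append(c)
--             i += 1
--     return ''.join(out)
-- ===== Notes on version B (the rewrite author's own statement) =====
-- stated objective: alternative
-- what changed: Replaces A's in-place string re-splicing (word = word[:i] + c*2 + word[i+1:] inside an index loop) by a single pass over vowel runs that appends pieces to a list and joins once, doubling only length-1 runs.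
import Mathlib
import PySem

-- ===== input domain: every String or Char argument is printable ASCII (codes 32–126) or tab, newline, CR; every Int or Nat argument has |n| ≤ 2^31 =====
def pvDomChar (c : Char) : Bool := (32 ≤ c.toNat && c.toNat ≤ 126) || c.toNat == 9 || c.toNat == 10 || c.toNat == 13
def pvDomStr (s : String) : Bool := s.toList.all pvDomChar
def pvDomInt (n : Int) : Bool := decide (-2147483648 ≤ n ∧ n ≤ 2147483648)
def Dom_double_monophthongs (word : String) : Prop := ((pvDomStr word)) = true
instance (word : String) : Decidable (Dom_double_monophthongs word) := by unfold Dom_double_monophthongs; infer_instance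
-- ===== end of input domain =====

-- B replaces A's in-place string re-splicing inside an index loop with a single pass over vowel runs that emits pieces and joins once (objective: alternative).
-- Both loop ports carry a structural fuel argument as a totality guard only; the proofs show it is always sufficient.

-- ===== PORT A =====
def pvIsV (c : Char) : Bool := (['3','i','u','e','E','o','a'] : List Char).contains c

-- inner `while i < len(word) - 1 and word[i + 1] in VOWELS: i += 1`
def pvInner (fuel : Nat) (w : List Char) (i : Nat) : Nat :=
  match fuel with
  | 0 => i
  | fuel + 1 =>
    if i < w.length - 1 ∧ pvIsV (w.getD (i+1) ' ') then pvInner fuel w (i+1) else i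

-- outer `while i < len(word): …` of A; the assignment `word = word[:i] + word[i]*2 + word[i+1:]`
-- is transliterated as the spliced list passed to the recursive call
def pvLoopA (fuel : Nat) (w : List Char) (i : Nat) : List Char :=
  match fuel with
  | 0 => w
  | fuel + 1 =>
    if i < w.length then
      if pvIsV (w.getD i ' ') then
        if i = w.length - 1 ∨ ¬ pvIsV (w.getD (i+1) ' ') then
          pvLoopA fuel (w.take i ++ [w.getD i ' ', w.getD i ' '] ++ w.drop (i+1))
            (pvInner (w.length + 1) (w.take i ++ [w.getD i ' ', w.getD i ' '] ++ w.drop (i+1)) i + 1)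
        else
          pvLoopA fuel w (pvInner w.length w i + 1)
      else pvLoopA fuel w (i+1)
    else w

def double_monophthongs (word : String) : String :=
  String.ofList (pvLoopA (PySem.Str.replace word "*" "").toList.length
    (PySem.Str.replace word "*" "").toList 0)

-- ===== PORT B =====
-- Source B's `j` scan over a vowel run is the takeWhile/dropWhile split; pieces are emitted left to right
def pvLoopB (fuel : Nat) (cs : List Char) : List Char :=
  match fuel, cs with
  | 0, _ => []
  | _ + 1, [] => []
  | fuel + 1, c :: rest =>
    if pvIsV c then
      if ((c :: rest).takeWhile pvIsV).length = 1 then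
        c :: c :: pvLoopB fuel ((c :: rest).dropWhile pvIsV)
      else ((c :: rest).takeWhile pvIsV) ++ pvLoopB fuel ((c :: rest).dropWhile pvIsV)
    else c :: pvLoopB fuel rest

def double_monophthongs_alt (word : String) : String :=
  String.ofList (pvLoopB (PySem.Str.replace word "*" "").toList.length
    (PySem.Str.replace word "*" "").toList)

-- ===== PRECONDITION & SPEC =====
def Spec_double_monophthongs (word : String) (out : String) : Prop := out = double_monophthongs_alt word
instance (word : String) (out : String) : Decidable (Spec_double_monophthongs word out) := by unfold Spec_double_monophthongs; infer_instance

-- ===== CLAIM (what is proved, stated in full; the proofs are below) =====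
def Claim_equal_double_monophthongs : Prop := ∀ (word : String), Dom_double_monophthongs word → Spec_double_monophthongs word (double_monophthongs word)

-- ===== LEMMAS AND PROOFS =====

theorem pvDropCons (w : List Char) (i : Nat) (h : i < w.length) :
    w.drop i = w.getD i ' ' :: w.drop (i+1) := by
  rw [List.drop_eq_getElem_cons h]
  simp [List.getD, List.getElem?_eq_getElem h]

theorem pvInner_spec (fuel : Nat) (w : List Char) (i : Nat)
    (hf : w.length - (i+1) ≤ fuel) :
    pvInner fuel w i = i + ((w.drop (i+1)).takeWhile pvIsV).length := by
  induction fuel generalizing i with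
  | zero =>
    have hd : w.drop (i+1) = [] := List.drop_eq_nil_of_le (by omega)
    simp [pvInner, hd]
  | succ fuel ih =>
    rw [pvInner]
    by_cases h : i < w.length - 1 ∧ pvIsV (w.getD (i+1) ' ') = true
    · obtain ⟨h1, h2⟩ := h
      rw [if_pos ⟨h1, h2⟩, ih (i+1) (by omega)]
      rw [pvDropCons w (i+1) (by omega), List.takeWhile_cons, if_pos h2]
      simp; omega
    · rw [if_neg h]
      by_cases h1 : i + 1 < w.length
      · have h2 : ¬ pvIsV (w.getD (i+1) ' ') = true := fun hc => h ⟨by omega, hc⟩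
        rw [pvDropCons w (i+1) h1, List.takeWhile_cons, if_neg h2]
        simp
      · have : w.drop (i+1) = [] := List.drop_eq_nil_of_le (by omega)
        simp [this]

theorem pvTakeWhileNil_dropWhile {l : List Char} (h : l.takeWhile pvIsV = []) :
    l.dropWhile pvIsV = l := by
  cases l with
  | nil => rfl
  | cons a t =>
    rw [List.takeWhile_cons] at h
    split at h
    · simp_all
    · rw [List.dropWhile_cons]; simp_all

theorem pvTake_takeWhile (l : List Char) :
    l.take (l.takeWhile pvIsV).length = l.takeWhile pvIsV := by
  have h := List.take_left' (l₁ := l.takeWhile pvIsV) (l₂ := l.dropWhile pvIsV)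
    (i := (l.takeWhile pvIsV).length) rfl
  rwa [List.takeWhile_append_dropWhile] at h

theorem pvDrop_takeWhile (l : List Char) :
    l.drop (l.takeWhile pvIsV).length = l.dropWhile pvIsV := by
  have h := List.drop_left' (l₁ := l.takeWhile pvIsV) (l₂ := l.dropWhile pvIsV)
    (i := (l.takeWhile pvIsV).length) rfl
  rwa [List.takeWhile_append_dropWhile] at h

-- B's pass does not depend on the exact fuel, as long as it covers the list
theorem pvLoopB_fuel (f1 : Nat) : ∀ (f2 : Nat) (cs : List Char),
    cs.length ≤ f1 → cs.length ≤ f2 → pvLoopB f1 cs = pvLoopB f2 cs := by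
  induction f1 with
  | zero =>
    intro f2 cs h1 _
    have : cs = [] := List.eq_nil_of_length_eq_zero (by omega)
    subst this
    cases f2 <;> rfl
  | succ f1 ih =>
    intro f2 cs h1 h2
    cases cs with
    | nil => cases f2 <;> rfl
    | cons c rest =>
      cases f2 with
      | zero => simp at h2
      | succ f2 =>
        rw [pvLoopB, pvLoopB]
        have hr1 : rest.length ≤ f1 := by simp at h1; omega
        have hr2 : rest.length ≤ f2 := by simp at h2; omega
        by_cases hv : pvIsV c
        · have hdwr : ((c :: rest).dropWhile pvIsV).length ≤ rest.length := by
            rw [List.dropWhile_cons, if_pos hv]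
            exact List.length_dropWhile_le _ _
          have hx := ih f2 ((c :: rest).dropWhile pvIsV) (le_trans hdwr hr1) (le_trans hdwr hr2)
          by_cases hl : ((c :: rest).takeWhile pvIsV).length = 1
          · rw [if_pos hv, if_pos hv, if_pos hl, if_pos hl, hx]
          · rw [if_pos hv, if_pos hv, if_neg hl, if_neg hl, hx]
        · rw [if_neg hv, if_neg hv, ih f2 rest hr1 hr2]

-- A at position i never looks back, so its remaining work is exactly B's pass over the suffix
theorem pvLoopA_eq (fuel : Nat) : ∀ (w : List Char) (i : Nat), w.length - i ≤ fuel →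
    pvLoopA fuel w i = w.take i ++ pvLoopB (w.drop i).length (w.drop i) := by
  induction fuel with
  | zero =>
    intro w i hle
    rw [pvLoopA, List.drop_eq_nil_of_le (by omega), List.take_of_length_le (by omega)]
    simp [pvLoopB]
  | succ fuel ih =>
    intro w i hle
    rw [pvLoopA]
    by_cases h : i < w.length
    · rw [if_pos h]
      have hdropi := pvDropCons w i h
      by_cases hv : pvIsV (w.getD i ' ')
      · rw [if_pos hv]
        by_cases hd : i = w.length - 1 ∨ ¬ pvIsV (w.getD (i+1) ' ')
        · rw [if_pos hd]
          set c := w.getD i ' ' with hc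
          -- the run at i has length 1
          have hrun : (w.drop (i+1)).takeWhile pvIsV = [] := by
            rcases hd with hd | hd
            · rw [List.drop_eq_nil_of_le (by omega)]; rfl
            · by_cases h1 : i + 1 < w.length
              · rw [pvDropCons w (i+1) h1, List.takeWhile_cons, if_neg hd]
              · rw [List.drop_eq_nil_of_le (by omega)]; rfl
          have hdw : (w.drop (i+1)).dropWhile pvIsV = w.drop (i+1) :=
            pvTakeWhileNil_dropWhile hrun
          -- splice structure
          have hsp : w.take i ++ [c, c] ++ w.drop (i+1)
              = (w.take i ++ [c]) ++ (c :: w.drop (i+1)) := by simp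
          have hlen1 : (w.take i ++ [c]).length = i + 1 := by simp; omega
          have hdrop1 : (w.take i ++ [c, c] ++ w.drop (i+1)).drop (i+1) = c :: w.drop (i+1) := by
            rw [hsp]; exact List.drop_left' hlen1
          have hsp2 : w.take i ++ [c, c] ++ w.drop (i+1)
              = (w.take i ++ [c, c]) ++ w.drop (i+1) := by simp
          have hlen2 : (w.take i ++ [c, c]).length = i + 2 := by simp; omega
          have hdrop2 : (w.take i ++ [c, c] ++ w.drop (i+1)).drop (i+2) = w.drop (i+1) := by
            rw [hsp2]; exact List.drop_left' hlen2
          have htake2 : (w.take i ++ [c, c] ++ w.drop (i+1)).take (i+2) = w.take i ++ [c, c] := by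
            rw [hsp2]; exact List.take_left' hlen2
          have hlen' : (w.take i ++ [c, c] ++ w.drop (i+1)).length = w.length + 1 := by
            simp; omega
          have hinner : pvInner (w.length + 1) (w.take i ++ [c, c] ++ w.drop (i+1)) i = i + 1 := by
            rw [pvInner_spec _ _ _ (by omega), hdrop1, List.takeWhile_cons, if_pos hv, hrun]
            simp
          rw [hinner, ih _ (i+2) (by omega), hdrop2, htake2]
          rw [hdropi]
          simp only [List.length_cons]
          rw [pvLoopB, if_pos hv, List.takeWhile_cons, if_pos hv, hrun]
          rw [List.dropWhile_cons, if_pos hv, hdw]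
          simp
        · rw [if_neg hd]
          have hne : i ≠ w.length - 1 := fun h' => hd (Or.inl h')
          have hnv : pvIsV (w.getD (i+1) ' ') = true := by
            by_contra hc; exact hd (Or.inr hc)
          have h1 : i + 1 < w.length := by omega
          have htpos : 1 ≤ ((w.drop (i+1)).takeWhile pvIsV).length := by
            rw [pvDropCons w (i+1) h1, List.takeWhile_cons, if_pos hnv]; simp
          have htlen : ((w.drop (i+1)).takeWhile pvIsV).length ≤ (w.drop (i+1)).length :=
            (List.takeWhile_sublist _).length_le
          have hdw : w.drop (i + ((w.drop (i+1)).takeWhile pvIsV).length + 1)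
              = (w.drop (i+1)).dropWhile pvIsV := by
            rw [show i + ((w.drop (i+1)).takeWhile pvIsV).length + 1
                  = (i+1) + ((w.drop (i+1)).takeWhile pvIsV).length from by omega]
            rw [← pvDrop_takeWhile, List.drop_drop]
          have htk : w.take (i + ((w.drop (i+1)).takeWhile pvIsV).length + 1)
              = w.take i ++ (w.getD i ' ' :: (w.drop (i+1)).takeWhile pvIsV) := by
            rw [show i + ((w.drop (i+1)).takeWhile pvIsV).length + 1
                  = i + (((w.drop (i+1)).takeWhile pvIsV).length + 1) from by omega]
            rw [List.take_add, hdropi, List.take_succ_cons, pvTake_takeWhile]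
          have hlengths : (w.drop (i+1)).length = w.length - (i+1) := by simp
          have hm : w.length - (i + ((w.drop (i+1)).takeWhile pvIsV).length + 1) ≤ fuel := by omega
          rw [pvInner_spec _ _ _ (by omega), ih _ (i + ((w.drop (i+1)).takeWhile pvIsV).length + 1) hm]
          rw [htk, hdw, hdropi]
          simp only [List.length_cons]
          rw [pvLoopB, if_pos hv, List.takeWhile_cons, if_pos hv]
          rw [if_neg (by simp only [List.length_cons]; omega), List.dropWhile_cons, if_pos hv]
          rw [pvLoopB_fuel ((w.drop (i+1)).dropWhile pvIsV).length ((w.drop (i+1)).length)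
            ((w.drop (i+1)).dropWhile pvIsV) (le_refl _) (List.dropWhile_sublist _).length_le]
          simp
      · rw [if_neg hv]
        rw [ih _ (i+1) (by omega)]
        rw [hdropi]
        simp only [List.length_cons]
        rw [pvLoopB, if_neg hv]
        have : w.take (i+1) = w.take i ++ [w.getD i ' '] := by
          rw [List.take_add_one]
          simp [List.getD, List.getElem?_eq_getElem h]
        rw [this]
        simp
    · rw [if_neg h]
      rw [List.drop_eq_nil_of_le (by omega), List.take_of_length_le (by omega)]
      simp [pvLoopB]

-- ===== VERDICT (by name: the statement is the Claim_ definition above) =====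
theorem double_monophthongs_spec : Claim_equal_double_monophthongs := by
  intro word _
  unfold Spec_double_monophthongs double_monophthongs double_monophthongs_alt
  rw [pvLoopA_eq _ _ 0 (by omega)]
  simp
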